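-- pv_equiv track=rewrite | github.com/ternary-solutions/bkash-python | bkash_pgw_tokenized/sns_verify.py | _normalize_lambda_style_keys
-- ===== SOURCE A (Python) =====
-- from typing import Any
--
-- def _normalize_lambda_style_keys(data: dict[str, Any]) -> dict[str, Any]:
--     out = dict(data)
--     replacements = {
--         "SigningCertUrl": "SigningCertURL",
--         "SubscribeUrl": "SubscribeURL",
--         "UnsubscribeUrl": "UnsubscribeURL",
--     }
--     for old, new in replacements.items():
--         if old in out and new not in out:
--             out[new] = out.pop(old)
--     return out
-- ===== SOURCE B (Python) =====
-- from typing import Any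
--
--
-- def _normalize_lambda_style_keys(data: dict[str, Any]) -> dict[str, Any]:
--     replacements = {
--         "SigningCertUrl": "SigningCertURL",
--         "SubscribeUrl": "SubscribeURL",
--         "UnsubscribeUrl": "UnsubscribeURL",
--     }
--     renamed = [(new, data[old]) for old, new in replacements.items()
--                if old in data and new not in data]
--     kept = [(k, v) for k, v in data.items()
--             if not (k in replacements and replacements[k] not in data)]
--     return dict(kept + renamed)
-- ===== Notes on version B (the rewrite author's own statement) =====
-- stated objective: idiomatic
-- what changed: B builds the result dict functionally in comprehensions (one filter over the items dropping the keys being renamed, plus the computed list of renamed pairs appended) instead of A's copy-then-mutate loop of pop/reinsert on the output dict.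
import Mathlib
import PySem

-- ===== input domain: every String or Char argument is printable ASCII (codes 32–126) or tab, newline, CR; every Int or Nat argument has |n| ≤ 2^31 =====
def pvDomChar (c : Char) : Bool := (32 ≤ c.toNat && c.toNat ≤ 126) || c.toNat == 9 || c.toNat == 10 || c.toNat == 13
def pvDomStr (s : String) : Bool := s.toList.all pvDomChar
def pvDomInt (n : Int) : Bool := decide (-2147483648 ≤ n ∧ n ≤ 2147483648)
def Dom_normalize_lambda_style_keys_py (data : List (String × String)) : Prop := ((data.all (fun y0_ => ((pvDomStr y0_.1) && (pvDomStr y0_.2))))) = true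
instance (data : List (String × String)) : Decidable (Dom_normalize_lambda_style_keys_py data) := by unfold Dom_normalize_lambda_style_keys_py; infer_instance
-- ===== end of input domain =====

-- B rebuilds the dict functionally (one filter over the items plus the computed renamed pairs appended)
-- instead of A's copy-then-pop/reinsert mutation loop; same O(n) cost, return value identical.

-- ===== PORT A =====
-- the `replacements` literal of both Pythons
def pvRepl : List (String × String) :=
  [("SigningCertUrl", "SigningCertURL"),
   ("SubscribeUrl", "SubscribeURL"),
   ("UnsubscribeUrl", "UnsubscribeURL")]

-- one iteration of A's loop: if old in out and new not in out: out[new] = out.pop(old)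
def pvStepA (o : PySem.Dict String String) (r : String × String) : PySem.Dict String String :=
  if o.contains r.1 && !o.contains r.2 then
    match o.pop? r.1 with
    | some (v, o') => o'.insert r.2 v
    | none => o
  else o

def normalize_lambda_style_keys_py (data : List (String × String)) : List (String × String) :=
  (pvRepl.foldl pvStepA (PySem.Dict.ofList data)).items

-- ===== PORT B =====
def normalize_lambda_style_keys_py_alt (data : List (String × String)) : List (String × String) :=
  let d := PySem.Dict.ofList data
  let repl := PySem.Dict.ofList pvRepl
  -- renamed = [(new, data[old]) for old, new in replacements.items() if old in data and new not in data]
  -- (data[old] is guarded by 'old in data', so getD is exact here)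
  let renamed := (repl.items.filter (fun r => d.contains r.1 && !d.contains r.2)).map
      (fun r => (r.2, d.getD r.1 ""))
  -- kept = [(k, v) for k, v in data.items() if not (k in replacements and replacements[k] not in data)]
  let kept := d.items.filter (fun kv => !(repl.contains kv.1 && !d.contains (repl.getD kv.1 "")))
  (PySem.Dict.ofList (kept ++ renamed)).items

-- ===== PRECONDITION & SPEC =====
def Spec_normalize_lambda_style_keys_py (data : List (String × String)) (out : List (String × String)) : Prop := out = normalize_lambda_style_keys_py_alt data
instance (data : List (String × String)) (out : List (String × String)) : Decidable (Spec_normalize_lambda_style_keys_py data out) := by unfold Spec_normalize_lambda_style_keys_py; infer_instance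

-- ===== CLAIM (what is proved, stated in full; the proofs are below) =====
def Claim_equal_normalize_lambda_style_keys_py : Prop := ∀ (data : List (String × String)), Dom_normalize_lambda_style_keys_py data → Spec_normalize_lambda_style_keys_py data (normalize_lambda_style_keys_py data)

-- ===== LEMMAS AND PROOFS =====

-- find? for a key x is unchanged by filtering away the entries of a different key a
lemma pv_find_key_filter {β : Type} (l : List (String × β)) (a x : String) (hx : x ≠ a) :
    (l.filter (fun p => !(p.1 == a))).find? (fun p => p.1 == x)
      = l.find? (fun p => p.1 == x) := by
  induction l with
  | nil => rfl
  | cons p t ih =>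
    rw [List.filter_cons]
    by_cases hp : p.1 = a
    · have h1 : (!(p.1 == a)) = false := by simp [hp]
      have h2 : (p.1 == x) = false := by
        simp only [beq_eq_false_iff_ne, ne_eq, hp]
        exact fun h => hx (Eq.symm h)
      rw [h1, if_neg (by simp), ih, List.find?_cons_of_neg (by simp [h2])]
    · have h1 : (!(p.1 == a)) = true := by simp [hp]
      rw [h1, if_pos rfl]
      cases hq : (p.1 == x) <;> simp [hq, ih]

lemma pv_items_stepA (o : PySem.Dict String String) (r : String × String)
    (h : (o.contains r.1 && !o.contains r.2) = true) :
    (pvStepA o r).items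
      = o.items.filter (fun p => !(p.1 == r.1)) ++ [(r.2, o.getD r.1 "")] := by
  obtain ⟨hc, hb⟩ := Bool.and_eq_true_iff.mp h
  have hb' : o.contains r.2 = false := by
    cases hcb : o.contains r.2 <;> simp [hcb] at hb ⊢
  obtain ⟨v, hv⟩ : ∃ v, o.get? r.1 = some v := by
    rw [PySem.Dict.contains_eq_isSome_get?] at hc
    exact Option.isSome_iff_exists.mp hc
  have herase : (o.erase r.1).contains r.2 = false := by
    unfold PySem.Dict.contains PySem.Dict.erase at *
    rcases List.any_eq_false.mp hb' with _
    apply List.any_eq_false.mpr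
    intro p hp
    exact List.any_eq_false.mp hb' p (List.mem_of_mem_filter hp)
  have : pvStepA o r = (o.erase r.1).insert r.2 v := by
    unfold pvStepA
    rw [h]
    simp [PySem.Dict.pop?, hv]
  rw [this, PySem.Dict.items_insert_of_not_contains _ _ herase]
  have : (o.erase r.1).items = o.items.filter (fun p => !(p.1 == r.1)) := rfl
  rw [this, PySem.Dict.getD_of_get?_eq_some o "" hv]

lemma pv_stepA_of_not (o : PySem.Dict String String) (r : String × String)
    (h : (o.contains r.1 && !o.contains r.2) = false) : pvStepA o r = o := by
  unfold pvStepA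
  rw [h]
  simp

lemma pv_get?_stepA_of_ne (o : PySem.Dict String String) (r : String × String) (x : String)
    (hx1 : x ≠ r.1) (hx2 : x ≠ r.2) :
    (pvStepA o r).get? x = o.get? x := by
  by_cases h : (o.contains r.1 && !o.contains r.2) = true
  · have hi := pv_items_stepA o r h
    unfold PySem.Dict.get?
    rw [hi, List.find?_append, pv_find_key_filter _ _ _ hx1]
    have : List.find? (fun p => p.1 == x) [(r.2, o.getD r.1 "")] = none := by
      simp only [List.find?_cons, List.find?_nil]
      have : (r.2 == x) = false := by
        simp only [beq_eq_false_iff_ne, ne_eq]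
        exact fun h => hx2 (Eq.symm h)
      rw [this]
    rw [this]
    cases List.find? (fun p => p.1 == x) o.items <;> rfl
  · rw [pv_stepA_of_not o r (Bool.eq_false_iff.mpr h)]

lemma pv_contains_stepA_of_ne (o : PySem.Dict String String) (r : String × String) (x : String)
    (hx1 : x ≠ r.1) (hx2 : x ≠ r.2) :
    (pvStepA o r).contains x = o.contains x := by
  rw [PySem.Dict.contains_eq_isSome_get?, PySem.Dict.contains_eq_isSome_get?,
    pv_get?_stepA_of_ne o r x hx1 hx2]

lemma pv_getD_stepA_of_ne (o : PySem.Dict String String) (r : String × String) (x : String)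
    (hx1 : x ≠ r.1) (hx2 : x ≠ r.2) :
    (pvStepA o r).getD x "" = o.getD x "" := by
  rw [PySem.Dict.getD_eq_get?_getD, PySem.Dict.getD_eq_get?_getD,
    pv_get?_stepA_of_ne o r x hx1 hx2]

lemma pv_nodup_keys_stepA (o : PySem.Dict String String) (r : String × String)
    (hnd : o.keys.Nodup) : (pvStepA o r).keys.Nodup := by
  by_cases h : (o.contains r.1 && !o.contains r.2) = true
  · have hb : o.contains r.2 = false := by
      obtain ⟨_, hb⟩ := Bool.and_eq_true_iff.mp h
      cases hcb : o.contains r.2 <;> simp [hcb] at hb ⊢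
    have hi := pv_items_stepA o r h
    unfold PySem.Dict.keys at *
    rw [hi, List.map_append]
    apply List.Nodup.append
    · exact (List.filter_sublist.map Prod.fst).nodup hnd
    · simp
    · intro x hx hx2
      simp at hx2
      subst hx2
      have : o.contains r.2 = true := by
        unfold PySem.Dict.contains
        apply List.any_eq_true.mpr
        obtain ⟨p, hp, hpx⟩ := List.mem_map.mp hx
        exact ⟨p, List.mem_of_mem_filter hp, by simp [hpx]⟩
      rw [this] at hb; exact absurd hb (by simp)
  · rw [pv_stepA_of_not o r (Bool.eq_false_iff.mpr h)]
    exact hnd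

lemma pv_any_congr {α : Type} (l : List α) (f g : α → Bool) (h : ∀ x ∈ l, f x = g x) :
    l.any f = l.any g := by
  induction l with
  | nil => rfl
  | cons a t ih =>
    rw [List.any_cons, List.any_cons, h a List.mem_cons_self,
      ih (fun x hx => h x (List.mem_cons_of_mem a hx))]

-- master characterisation of A's loop over any replacement list with
-- pairwise-distinct sources, pairwise-distinct targets, and no source equal to a target
lemma pv_master (rs : List (String × String)) (o : PySem.Dict String String)
    (hnd : o.keys.Nodup)
    (hsrc : (rs.map Prod.fst).Nodup)
    (htgt : (rs.map Prod.snd).Nodup)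
    (hdisj : ∀ r ∈ rs, ∀ r' ∈ rs, r.1 ≠ r'.2) :
    (rs.foldl pvStepA o).items
      = o.items.filter (fun p => !(rs.any (fun r => r.1 == p.1 && !o.contains r.2)))
        ++ (rs.filter (fun r => o.contains r.1 && !o.contains r.2)).map
            (fun r => (r.2, o.getD r.1 "")) := by
  induction rs generalizing o with
  | nil => simp
  | cons r rest ih =>
    have hrmem : r ∈ r :: rest := List.mem_cons_self
    have hne1 : ∀ r' ∈ rest, r'.1 ≠ r.1 := by
      intro r' hr' he
      have := List.nodup_cons.mp hsrc
      exact this.1 (he ▸ List.mem_map_of_mem hr')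
    have hne2 : ∀ r' ∈ rest, r'.1 ≠ r.2 :=
      fun r' hr' => hdisj r' (List.mem_cons_of_mem r hr') r hrmem
    have hne3 : ∀ r' ∈ rest, r'.2 ≠ r.1 :=
      fun r' hr' he => (hdisj r hrmem r' (List.mem_cons_of_mem r hr')) he.symm
    have hne4 : ∀ r' ∈ rest, r'.2 ≠ r.2 := by
      intro r' hr' he
      have := List.nodup_cons.mp htgt
      exact this.1 (he ▸ List.mem_map_of_mem hr')
    have hsrc' : (rest.map Prod.fst).Nodup := (List.nodup_cons.mp hsrc).2
    have htgt' : (rest.map Prod.snd).Nodup := (List.nodup_cons.mp htgt).2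
    have hdisj' : ∀ r' ∈ rest, ∀ r'' ∈ rest, r'.1 ≠ r''.2 :=
      fun r' h' r'' h'' => hdisj r' (List.mem_cons_of_mem r h') r'' (List.mem_cons_of_mem r h'')
    rw [List.foldl_cons]
    by_cases hq : (o.contains r.1 && !o.contains r.2) = true
    · obtain ⟨hc, hb⟩ := Bool.and_eq_true_iff.mp hq
      have hb' : o.contains r.2 = false := by
        cases hcb : o.contains r.2 <;> simp [hcb] at hb ⊢
      have hstep := pv_items_stepA o r hq
      have hnd' : (pvStepA o r).keys.Nodup := pv_nodup_keys_stepA o r hnd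
      rw [ih (pvStepA o r) hnd' hsrc' htgt' hdisj']
      -- replace every o'-observation by the o-observation
      have hcont2 : ∀ r' ∈ rest, (pvStepA o r).contains r'.2 = o.contains r'.2 :=
        fun r' h' => pv_contains_stepA_of_ne o r r'.2 (hne3 r' h') (hne4 r' h')
      have hcfil : rest.filter (fun r' => (pvStepA o r).contains r'.1 && !(pvStepA o r).contains r'.2)
          = rest.filter (fun r' => o.contains r'.1 && !o.contains r'.2) := by
        apply List.filter_congr
        intro r' h'
        rw [pv_contains_stepA_of_ne o r r'.1 (hne1 r' h') (hne2 r' h'), hcont2 r' h']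
      have hmapf : (rest.filter (fun r' => o.contains r'.1 && !o.contains r'.2)).map
            (fun r' => (r'.2, (pvStepA o r).getD r'.1 ""))
          = (rest.filter (fun r' => o.contains r'.1 && !o.contains r'.2)).map
            (fun r' => (r'.2, o.getD r'.1 "")) := by
        apply List.map_congr_left
        intro r' h'
        have h'' := List.mem_of_mem_filter h'
        rw [pv_getD_stepA_of_ne o r r'.1 (hne1 r' h'') (hne2 r' h'')]
      rw [hcfil, hmapf]
      have hanyeq : ∀ p : String × String,
          (rest.any (fun r' => r'.1 == p.1 && !(pvStepA o r).contains r'.2))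
            = (rest.any (fun r' => r'.1 == p.1 && !o.contains r'.2)) :=
        fun p => pv_any_congr rest _ _ (fun r' h' => by rw [hcont2 r' h'])
      have hPfil : (pvStepA o r).items.filter
            (fun p => !(rest.any (fun r' => r'.1 == p.1 && !(pvStepA o r).contains r'.2)))
          = (pvStepA o r).items.filter
            (fun p => !(rest.any (fun r' => r'.1 == p.1 && !o.contains r'.2))) := by
        apply List.filter_congr
        intro p _
        rw [hanyeq p]
      rw [hPfil, hstep, List.filter_append]
      have hsingle : List.filter
            (fun p => !(rest.any (fun r' => r'.1 == p.1 && !o.contains r'.2)))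
            [(r.2, o.getD r.1 "")] = [(r.2, o.getD r.1 "")] := by
        have : (rest.any (fun r' => r'.1 == r.2 && !o.contains r'.2)) = false := by
          apply List.any_eq_false.mpr
          intro r' h'
          simp [hne2 r' h']
        simp [List.filter, this]
      rw [hsingle, List.filter_filter]
      have hkept : List.filter
            (fun p => !(rest.any (fun r' => r'.1 == p.1 && !o.contains r'.2)) && !(p.1 == r.1))
            o.items
          = List.filter
            (fun p => !((r :: rest).any (fun r' => r'.1 == p.1 && !o.contains r'.2)))
            o.items := by
        apply List.filter_congr
        intro p _
        by_cases hpr : p.1 = r.1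
        · simp [List.any_cons, hpr, hb']
        · have h1 : (p.1 == r.1) = false := by simp [hpr]
          have h2 : (r.1 == p.1) = false := by
            simp only [beq_eq_false_iff_ne, ne_eq]
            exact fun he => hpr he.symm
          simp [List.any_cons, h1, h2]
      rw [hkept]
      have hcrest : List.filter (fun r' => o.contains r'.1 && !o.contains r'.2) (r :: rest)
          = r :: List.filter (fun r' => o.contains r'.1 && !o.contains r'.2) rest := by
        rw [List.filter_cons, if_pos (by simp [hq])]
      rw [hcrest, List.map_cons, List.append_assoc]
      rfl
    · have hq' : (o.contains r.1 && !o.contains r.2) = false := Bool.eq_false_iff.mpr hq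
      rw [pv_stepA_of_not o r hq', ih o hnd hsrc' htgt' hdisj']
      have hkept : List.filter
            (fun p => !(rest.any (fun r' => r'.1 == p.1 && !o.contains r'.2))) o.items
          = List.filter
            (fun p => !((r :: rest).any (fun r' => r'.1 == p.1 && !o.contains r'.2))) o.items := by
        apply List.filter_congr
        intro p hp
        have hA : (r.1 == p.1 && !o.contains r.2) = false := by
          rcases Bool.and_eq_false_iff.mp hq' with h1 | h2
          · have : (r.1 == p.1) = false := by
              simp only [beq_eq_false_iff_ne, ne_eq]
              intro he
              have : o.contains r.1 = true := by
                unfold PySem.Dict.contains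
                exact List.any_eq_true.mpr ⟨p, hp, by simp [he]⟩
              rw [this] at h1; exact absurd h1 (by simp)
            simp [this]
          · have : o.contains r.2 = true := by
              cases hcb : o.contains r.2 <;> simp [hcb] at h2 ⊢
            simp [this]
        simp [List.any_cons, hA]
      rw [hkept]
      have hcrest : List.filter (fun r' => o.contains r'.1 && !o.contains r'.2) (r :: rest)
          = List.filter (fun r' => o.contains r'.1 && !o.contains r'.2) rest := by
        rw [List.filter_cons, if_neg (by simp [hq'])]
      rw [hcrest]

-- the membership tests of B's comprehension agree pointwise with the master predicate
lemma pv_repl_items : (PySem.Dict.ofList pvRepl).items = pvRepl := by decide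

lemma pv_kept_pred (o : PySem.Dict String String) (k : String) :
    (!((PySem.Dict.ofList pvRepl).contains k
        && !o.contains ((PySem.Dict.ofList pvRepl).getD k "")))
      = !(pvRepl.any (fun r => r.1 == k && !o.contains r.2)) := by
  by_cases h1 : k = "SigningCertUrl"
  · subst h1
    rw [(by decide : (PySem.Dict.ofList pvRepl).contains "SigningCertUrl" = true),
      (by decide : (PySem.Dict.ofList pvRepl).getD "SigningCertUrl" "" = "SigningCertURL")]
    cases hX : o.contains "SigningCertURL" <;> simp [pvRepl, hX]
  by_cases h2 : k = "SubscribeUrl"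
  · subst h2
    rw [(by decide : (PySem.Dict.ofList pvRepl).contains "SubscribeUrl" = true),
      (by decide : (PySem.Dict.ofList pvRepl).getD "SubscribeUrl" "" = "SubscribeURL")]
    cases hX : o.contains "SubscribeURL" <;> simp [pvRepl, hX]
  by_cases h3 : k = "UnsubscribeUrl"
  · subst h3
    rw [(by decide : (PySem.Dict.ofList pvRepl).contains "UnsubscribeUrl" = true),
      (by decide : (PySem.Dict.ofList pvRepl).getD "UnsubscribeUrl" "" = "UnsubscribeURL")]
    cases hX : o.contains "UnsubscribeURL" <;> simp [pvRepl, hX]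
  have e1 : ("SigningCertUrl" == k) = false := by
    simp only [beq_eq_false_iff_ne, ne_eq]; exact fun he => h1 he.symm
  have e2 : ("SubscribeUrl" == k) = false := by
    simp only [beq_eq_false_iff_ne, ne_eq]; exact fun he => h2 he.symm
  have e3 : ("UnsubscribeUrl" == k) = false := by
    simp only [beq_eq_false_iff_ne, ne_eq]; exact fun he => h3 he.symm
  have hcont : (PySem.Dict.ofList pvRepl).contains k = false := by
    unfold PySem.Dict.contains
    rw [pv_repl_items]
    simp [pvRepl, e1, e2, e3]
  rw [hcont]
  simp [pvRepl, e1, e2, e3]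

lemma pv_ofList_items_of_nodup (l : List (String × String))
    (h : (l.map Prod.fst).Nodup) : (PySem.Dict.ofList l).items = l := by
  unfold PySem.Dict.ofList PySem.Dict.update
  rw [PySem.Dict.items_foldl_insert_fresh l Prod.fst Prod.snd PySem.Dict.empty
    (fun a _ => by simp [pysem]) h]
  simp [PySem.Dict.empty]


-- ===== VERDICT (by name: the statement is the Claim_ definition above) =====
theorem normalize_lambda_style_keys_py_spec : Claim_equal_normalize_lambda_style_keys_py := by
  intro data _
  unfold Spec_normalize_lambda_style_keys_py
  simp only [normalize_lambda_style_keys_py, normalize_lambda_style_keys_py_alt]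
  have hnd : (PySem.Dict.ofList data).keys.Nodup := PySem.Dict.nodup_keys_ofList data
  rw [pv_master pvRepl (PySem.Dict.ofList data) hnd (by decide) (by decide) (by decide),
    pv_repl_items]
  -- B's kept-filter agrees with the master predicate pointwise
  have hkept : (PySem.Dict.ofList data).items.filter
        (fun kv => !((PySem.Dict.ofList pvRepl).contains kv.1
          && !(PySem.Dict.ofList data).contains ((PySem.Dict.ofList pvRepl).getD kv.1 "")))
      = (PySem.Dict.ofList data).items.filter
        (fun p => !(pvRepl.any (fun r => r.1 == p.1 && !(PySem.Dict.ofList data).contains r.2))) :=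
    List.filter_congr (fun p _ => pv_kept_pred (PySem.Dict.ofList data) p.1)
  rw [hkept]
  -- dict() of the concatenated pairs is the identity on the items (all keys distinct)
  refine (pv_ofList_items_of_nodup _ ?_).symm
  rw [List.map_append]
  apply List.Nodup.append
  · exact List.Nodup.sublist (List.filter_sublist.map Prod.fst) hnd
  · rw [List.map_map]
    have : (Prod.fst ∘ fun r : String × String => (r.2, (PySem.Dict.ofList data).getD r.1 ""))
        = Prod.snd := rfl
    rw [this]
    exact ((by decide : (pvRepl.map Prod.snd).Nodup)).sublist (List.filter_sublist.map Prod.snd)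
  · intro x hx hx2
    obtain ⟨p, hp, hpx⟩ := List.mem_map.mp hx
    obtain ⟨q, hq, hqx⟩ := List.mem_map.mp hx2
    obtain ⟨r, hr, hrq⟩ := List.mem_map.mp hq
    have hcr := List.of_mem_filter hr
    obtain ⟨_, hcr2⟩ := Bool.and_eq_true_iff.mp hcr
    have hc2 : (PySem.Dict.ofList data).contains r.2 = false := by
      cases hcb : (PySem.Dict.ofList data).contains r.2 <;> simp [hcb] at hcr2 ⊢
    have hxk : x ∈ (PySem.Dict.ofList data).keys := by
      unfold PySem.Dict.keys
      exact hpx ▸ List.mem_map_of_mem (List.mem_of_mem_filter hp)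
    have : (PySem.Dict.ofList data).contains x = true := by
      rw [PySem.Dict.contains_iff_mem_keys] at *
      exact hxk
    rw [← hqx, ← hrq] at this
    simp at this hrq hqx
    rw [this] at hc2
    exact absurd hc2 (by simp)
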